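-- pv_equiv track=rewrite | github.com/OnemusCT/temporal-redux | sourcefiles/tests/tf-regression/test_tf_regression.py | _compare_function
-- ===== SOURCE A (Python) =====
-- def _compare_function(
--     tf_cmds: list[tuple[int, int]],          # (tf_addr, byte_len)
--     tr_cmds: list[tuple[int, int, str]],     # (tr_addr, byte_len, name)
-- ) -> tuple[bool, list[str]]:
--     """Align commands by address and compare byte lengths.
--
--     TF addresses are 1 higher than TR data indices (TF counts from the raw
--     event blob including the leading count byte; TR strips that byte).
--     We normalize by subtracting 1 from every TF address before comparing.
--
--     Returns (passed, diff_lines).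
--     """
--     tf_map = {tf_addr - 1: length for tf_addr, length in tf_cmds}
--     tr_map = {addr: (length, name) for addr, length, name in tr_cmds}
--
--     all_addrs = sorted(set(tf_map) | set(tr_map))
--
--     passed = True
--     diff: list[str] = []
--
--     for addr in all_addrs:
--         tf_len  = tf_map.get(addr)
--         tr_pair = tr_map.get(addr)
--
--         if tf_len is not None and tr_pair is not None:
--             tr_len, tr_name = tr_pair
--             ok = "✓" if tf_len == tr_len else "✗"
--             if tf_len != tr_len:
--                 passed = False
--             diff.append(
--                 f"  0x{addr:04X}  tf={tf_len:3d}B  tr={tr_len:3d}B  {ok}  {tr_name}"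
--             )
--         elif tf_len is not None:
--             passed = False
--             diff.append(f"  0x{addr:04X}  tf={tf_len:3d}B  tr=---    ✗  (missing in TR)")
--         else:
--             tr_len, tr_name = tr_pair
--             passed = False
--             diff.append(
--                 f"  0x{addr:04X}  tf=---   tr={tr_len:3d}B  ✗  (missing in TF)  {tr_name}"
--             )
--
--     return passed, diff
-- ===== SOURCE B (Python) =====
-- def _compare_function(
--     tf_cmds: list[tuple[int, int]],          # (tf_addr, byte_len)
--     tr_cmds: list[tuple[int, int, str]],     # (tr_addr, byte_len, name)
-- ) -> tuple[bool, list[str]]: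
--     """Two-pointer merge-join over the address-sorted dict items."""
--     tf_map = {tf_addr - 1: length for tf_addr, length in tf_cmds}
--     tr_map = {addr: (length, name) for addr, length, name in tr_cmds}
--
--     tf_items = sorted(tf_map.items(), key=lambda kv: kv[0])
--     tr_items = sorted(tr_map.items(), key=lambda kv: kv[0])
--
--     passed = True
--     diff: list[str] = []
--     i = j = 0
--     while i < len(tf_items) or j < len(tr_items):
--         if j >= len(tr_items) or (i < len(tf_items) and tf_items[i][0] < tr_items[j][0]):
--             addr, tf_len = tf_items[i]
--             passed = False
--             diff.append(f"  0x{addr:04X}  tf={tf_len:3d}B  tr=---    ✗  (missing in TR)")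
--             i += 1
--         elif i >= len(tf_items) or tr_items[j][0] < tf_items[i][0]:
--             addr, (tr_len, tr_name) = tr_items[j]
--             passed = False
--             diff.append(f"  0x{addr:04X}  tf=---   tr={tr_len:3d}B  ✗  (missing in TF)  {tr_name}")
--             j += 1
--         else:
--             addr, tf_len = tf_items[i]
--             _, (tr_len, tr_name) = tr_items[j]
--             ok = "✓" if tf_len == tr_len else "✗"
--             if tf_len != tr_len:
--                 passed = False
--             diff.append(f"  0x{addr:04X}  tf={tf_len:3d}B  tr={tr_len:3d}B  {ok}  {tr_name}")
--             i += 1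
--             j += 1
--     return passed, diff
-- ===== Notes on version B (the rewrite author's own statement) =====
-- stated objective: alternative
-- what changed: B replaces A's sorted(set(tf_map)|set(tr_map)) address list with per-address dict .get lookups by a two-pointer merge-join over the two address-sorted item lists, emitting matched/missing lines as the pointers advance.
import Mathlib
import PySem

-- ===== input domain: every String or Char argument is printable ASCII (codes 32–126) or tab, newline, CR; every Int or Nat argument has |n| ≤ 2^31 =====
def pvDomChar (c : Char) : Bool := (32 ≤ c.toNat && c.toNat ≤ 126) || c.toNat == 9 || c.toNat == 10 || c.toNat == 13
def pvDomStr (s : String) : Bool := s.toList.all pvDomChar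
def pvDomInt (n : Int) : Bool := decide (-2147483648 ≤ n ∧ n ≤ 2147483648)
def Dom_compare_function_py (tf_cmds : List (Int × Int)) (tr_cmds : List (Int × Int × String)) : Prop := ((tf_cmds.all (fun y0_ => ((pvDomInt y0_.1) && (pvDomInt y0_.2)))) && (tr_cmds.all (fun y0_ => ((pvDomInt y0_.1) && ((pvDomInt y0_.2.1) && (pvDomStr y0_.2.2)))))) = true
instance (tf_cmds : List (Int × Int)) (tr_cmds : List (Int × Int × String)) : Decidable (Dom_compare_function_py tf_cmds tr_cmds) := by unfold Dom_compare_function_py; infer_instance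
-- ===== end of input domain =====

-- B replaces A's sorted(set|set) union plus per-address dict lookups by a two-pointer
-- merge-join over the two address-sorted item lists (objective: alternative; same output).

-- ===== PORT A =====
-- formatting helpers, shared by both ports (they port the identical f-strings of Source A and Source B)
def pvHexDigitChar (n : Nat) : Char := if n < 10 then Char.ofNat (48 + n) else Char.ofNat (55 + n)

-- hex digits of n (uppercase, big-endian); exact port of the digits of format(n, 'X') for n ≥ 0
def pvHexChars (n : Nat) : List Char :=
  if h : n < 16 then [pvHexDigitChar n]
  else pvHexChars (n / 16) ++ [pvHexDigitChar (n % 16)]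
decreasing_by exact Nat.div_lt_self (by omega) (by omega)

def pvPadLeft (w : Nat) (c : Char) (s : List Char) : List Char := List.replicate (w - s.length) c ++ s

-- f"{a:04X}": zero-pad to total width 4, the sign (for a < 0) counted in the width
def pvHex04X (a : Int) : String :=
  if a < 0 then String.mk ('-' :: pvPadLeft 3 '0' (pvHexChars a.natAbs))
  else String.mk (pvPadLeft 4 '0' (pvHexChars a.toNat))

-- f"{n:3d}": space-pad str(n) on the left to width 3
def pvPad3d (n : Int) : String := String.mk (pvPadLeft 3 ' ' (PySem.Int.toStr n).toList)

def pvLineBoth (addr tf_len tr_len : Int) (tr_name : String) : String :=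
  "  0x" ++ pvHex04X addr ++ "  tf=" ++ pvPad3d tf_len ++ "B  tr=" ++ pvPad3d tr_len ++ "B  "
    ++ (if tf_len = tr_len then "✓" else "✗") ++ "  " ++ tr_name

def pvLineTF (addr tf_len : Int) : String :=
  "  0x" ++ pvHex04X addr ++ "  tf=" ++ pvPad3d tf_len ++ "B  tr=---    ✗  (missing in TR)"

def pvLineTR (addr tr_len : Int) (tr_name : String) : String :=
  "  0x" ++ pvHex04X addr ++ "  tf=---   tr=" ++ pvPad3d tr_len ++ "B  ✗  (missing in TF)  " ++ tr_name

-- the body of A's for-loop (tf_len = tf_map.get(addr), tr_pair = tr_map.get(addr))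
def pvStep (addr : Int) (tf_len : Option Int) (tr_pair : Option (Int × String)) (st : Bool × List String) : Bool × List String :=
  match tf_len, tr_pair with
  | some tl, some (rl, nm) => ((if tl ≠ rl then false else st.1), st.2 ++ [pvLineBoth addr tl rl nm])
  | some tl, none => (false, st.2 ++ [pvLineTF addr tl])
  | none, some (rl, nm) => (false, st.2 ++ [pvLineTR addr rl nm])
  | none, none => st  -- unreachable in A: addr is drawn from the union of the two key sets

def compare_function_py (tf_cmds : List (Int × Int)) (tr_cmds : List (Int × Int × String)) : Bool × List String :=
  let tf_map : PySem.Dict Int Int := tf_cmds.foldl (fun d p => d.insert (p.1 - 1) p.2) PySem.Dict.empty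
  let tr_map : PySem.Dict Int (Int × String) := tr_cmds.foldl (fun d p => d.insert p.1 p.2) PySem.Dict.empty
  let all_addrs := PySem.List.sorted (PySem.Set.union (PySem.Set.ofList tf_map.keys) (PySem.Set.ofList tr_map.keys)) (fun x => x)
  all_addrs.foldl (fun st addr => pvStep addr (tf_map.get? addr) (tr_map.get? addr) st) (true, [])

-- ===== PORT B =====
-- the two-pointer merge-join loop of Source B (i/j become the two list heads)
def pvMerge : List (Int × Int) → List (Int × Int × String) → Bool → List String → Bool × List String
  | [], [], p, acc => (p, acc)
  | (a, l) :: xs, [], _, acc => pvMerge xs [] false (acc ++ [pvLineTF a l])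
  | [], (b, m, nm) :: ys, _, acc => pvMerge [] ys false (acc ++ [pvLineTR b m nm])
  | (a, l) :: xs, (b, m, nm) :: ys, p, acc =>
      if a < b then pvMerge xs ((b, m, nm) :: ys) false (acc ++ [pvLineTF a l])
      else if b < a then pvMerge ((a, l) :: xs) ys false (acc ++ [pvLineTR b m nm])
      else pvMerge xs ys (if l ≠ m then false else p) (acc ++ [pvLineBoth a l m nm])
termination_by xs ys _ _ => xs.length + ys.length

def compare_function_py_alt (tf_cmds : List (Int × Int)) (tr_cmds : List (Int × Int × String)) : Bool × List String :=
  let tf_map : PySem.Dict Int Int := tf_cmds.foldl (fun d p => d.insert (p.1 - 1) p.2) PySem.Dict.empty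
  let tr_map : PySem.Dict Int (Int × String) := tr_cmds.foldl (fun d p => d.insert p.1 p.2) PySem.Dict.empty
  let tf_items := PySem.List.sorted tf_map.items (fun kv => kv.1)
  let tr_items := PySem.List.sorted tr_map.items (fun kv => kv.1)
  pvMerge tf_items tr_items true []

-- ===== PRECONDITION & SPEC =====
def Spec_compare_function_py (tf_cmds : List (Int × Int)) (tr_cmds : List (Int × Int × String)) (out : Bool × List String) : Prop := out = compare_function_py_alt tf_cmds tr_cmds
instance (tf_cmds : List (Int × Int)) (tr_cmds : List (Int × Int × String)) (out : Bool × List String) : Decidable (Spec_compare_function_py tf_cmds tr_cmds out) := by unfold Spec_compare_function_py; infer_instance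

-- ===== CLAIM (what is proved, stated in full; the proofs are below) =====
def Claim_equal_compare_function_py : Prop := ∀ (tf_cmds : List (Int × Int)) (tr_cmds : List (Int × Int × String)), Dom_compare_function_py tf_cmds tr_cmds → Spec_compare_function_py tf_cmds tr_cmds (compare_function_py tf_cmds tr_cmds)

-- ===== LEMMAS AND PROOFS =====

-- first-match association-list lookup (proof device relating both ports' lookups)
def pvALook {α : Type} : List (Int × α) → Int → Option α
  | [], _ => none
  | (k, v) :: t, a => if k = a then some v else pvALook t a

-- the merged key sequence of the two-pointer loop
def pvMKeys : List Int → List Int → List Int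
  | [], ys => ys
  | x :: xs, [] => x :: xs
  | a :: xs, b :: ys =>
      if a < b then a :: pvMKeys xs (b :: ys)
      else if b < a then b :: pvMKeys (a :: xs) ys
      else a :: pvMKeys xs ys
termination_by xs ys => xs.length + ys.length

theorem pvMKeys_nil_right (xs : List Int) : pvMKeys xs [] = xs := by
  cases xs <;> simp [pvMKeys]

theorem pv_mem_mkeys (u v : List Int) (c : Int) : c ∈ pvMKeys u v ↔ c ∈ u ∨ c ∈ v := by
  induction u, v using pvMKeys.induct with
  | case1 ys => simp [pvMKeys]
  | case2 x xs => simp [pvMKeys]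
  | case3 a xs b ys h ih => simp only [pvMKeys, if_pos h, List.mem_cons, ih]; tauto
  | case4 a xs b ys h1 h2 ih => simp only [pvMKeys, if_neg h1, if_pos h2, List.mem_cons, ih]; tauto
  | case5 a xs b ys h1 h2 ih =>
      have hab : a = b := le_antisymm (not_lt.1 h2) (not_lt.1 h1)
      subst hab
      simp only [pvMKeys, if_neg h1, if_neg h2, List.mem_cons, ih]; tauto

theorem pv_pairwise_mkeys (u v : List Int) (hu : u.Pairwise (· < ·)) (hv : v.Pairwise (· < ·)) :
    (pvMKeys u v).Pairwise (· < ·) := by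
  induction u, v using pvMKeys.induct with
  | case1 ys => simpa [pvMKeys] using hv
  | case2 x xs => simpa [pvMKeys] using hu
  | case3 a xs b ys h ih =>
      rw [List.pairwise_cons] at hu
      simp only [pvMKeys, if_pos h]
      refine List.pairwise_cons.2 ⟨?_, ih hu.2 hv⟩
      intro c hc
      rcases (pv_mem_mkeys _ _ c).1 hc with hc | hc
      · exact hu.1 c hc
      · rcases List.mem_cons.1 hc with rfl | hc
        · exact h
        · exact lt_trans h ((List.pairwise_cons.1 hv).1 c hc)
  | case4 a xs b ys h1 h2 ih =>
      rw [List.pairwise_cons] at hv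
      simp only [pvMKeys, if_neg h1, if_pos h2]
      refine List.pairwise_cons.2 ⟨?_, ih hu hv.2⟩
      intro c hc
      rcases (pv_mem_mkeys _ _ c).1 hc with hc | hc
      · rcases List.mem_cons.1 hc with rfl | hc
        · exact h2
        · exact lt_trans h2 ((List.pairwise_cons.1 hu).1 c hc)
      · exact hv.1 c hc
  | case5 a xs b ys h1 h2 ih =>
      have hab : a = b := le_antisymm (not_lt.1 h2) (not_lt.1 h1)
      subst hab
      rw [List.pairwise_cons] at hu hv
      simp only [pvMKeys, if_neg h1, if_neg h2]
      refine List.pairwise_cons.2 ⟨?_, ih hu.2 hv.2⟩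
      intro c hc
      rcases (pv_mem_mkeys _ _ c).1 hc with hc | hc
      · exact hu.1 c hc
      · exact hv.1 c hc

theorem pvALook_eq_none {α : Type} (l : List (Int × α)) (a : Int) (h : a ∉ l.map Prod.fst) :
    pvALook l a = none := by
  induction l with
  | nil => rfl
  | cons p t ih =>
      obtain ⟨k, v⟩ := p
      simp only [List.map_cons, List.mem_cons] at h
      push_neg at h
      simp only [pvALook, if_neg (fun hk : k = a => h.1 hk.symm)]
      exact ih h.2

theorem pvALook_eq_some {α : Type} (l : List (Int × α)) (a : Int) (v : α)
    (hnd : (l.map Prod.fst).Nodup) (h : (a, v) ∈ l) : pvALook l a = some v := by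
  induction l with
  | nil => cases h
  | cons p t ih =>
      obtain ⟨k, w⟩ := p
      simp only [List.map_cons, List.nodup_cons] at hnd
      rcases List.mem_cons.1 h with heq | hmem
      · cases heq; simp [pvALook]
      · have hka : k ≠ a := by
          intro hk; subst hk
          exact hnd.1 (List.mem_map.2 ⟨(k, v), hmem, rfl⟩)
        simp only [pvALook, if_neg hka]
        exact ih hnd.2 hmem

theorem pvALook_cons_ne {α : Type} (k : Int) (v : α) (t : List (Int × α)) (c : Int) (h : k ≠ c) :
    pvALook ((k, v) :: t) c = pvALook t c := by simp [pvALook, h]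

-- head decomposition of a strictly increasing key list
theorem pv_strict_cons {α : Type} {k : Int} {v : α} {t : List (Int × α)}
    (h : (((k, v) :: t).map Prod.fst).Pairwise (· < ·)) :
    (t.map Prod.fst).Pairwise (· < ·) ∧ ∀ c ∈ t.map Prod.fst, k < c := by
  rw [List.map_cons, List.pairwise_cons] at h
  exact ⟨h.2, h.1⟩

-- CORE: the merge-join equals A's loop over the merged key sequence with assoc-list lookups
theorem pv_merge_eq_foldl (xs : List (Int × Int)) (ys : List (Int × Int × String))
    (p : Bool) (acc : List String) :
    (xs.map Prod.fst).Pairwise (· < ·) → (ys.map Prod.fst).Pairwise (· < ·) →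
    pvMerge xs ys p acc =
      (pvMKeys (xs.map Prod.fst) (ys.map Prod.fst)).foldl
        (fun st a => pvStep a (pvALook xs a) (pvALook ys a) st) (p, acc) := by
  induction xs, ys, p, acc using pvMerge.induct with
  | case1 p acc => intro _ _; simp [pvMerge, pvMKeys]
  | case2 a l xs p acc ih =>
      intro hx _
      obtain ⟨hx2, hxh⟩ := pv_strict_cons hx
      simp only [List.map_cons, List.map_nil, pvMKeys_nil_right, List.foldl_cons]
      have h1 : pvALook ((a, l) :: xs) a = some l := by simp [pvALook]
      have h2 : pvALook ([] : List (Int × Int × String)) a = none := rfl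
      rw [h1, h2]
      have hstep : pvStep a (some l) none (p, acc) = (false, acc ++ [pvLineTF a l]) := rfl
      rw [hstep]
      conv_lhs => rw [pvMerge]
      rw [ih hx2 (by simp)]
      simp only [List.map_nil, pvMKeys_nil_right]
      refine PySem.List.foldl_congr_mem _ _ _ _ ?_
      intro st c hc
      have := hxh c hc
      rw [pvALook_cons_ne a l xs c (by omega)]
  | case3 b m nm ys p acc ih =>
      intro _ hy
      obtain ⟨hy2, hyh⟩ := pv_strict_cons hy
      simp only [List.map_cons, List.map_nil, pvMKeys, List.foldl_cons]
      have h1 : pvALook ([] : List (Int × Int)) b = none := rfl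
      have h2 : pvALook ((b, m, nm) :: ys) b = some (m, nm) := by simp [pvALook]
      rw [h1, h2]
      have hstep : pvStep b none (some (m, nm)) (p, acc) = (false, acc ++ [pvLineTR b m nm]) := rfl
      rw [hstep]
      conv_lhs => rw [pvMerge]
      rw [ih (by simp) hy2]
      simp only [List.map_nil, pvMKeys]
      refine PySem.List.foldl_congr_mem _ _ _ _ ?_
      intro st c hc
      have := hyh c hc
      rw [pvALook_cons_ne b (m, nm) ys c (by omega)]
  | case4 a l xs b m nm ys p acc hab ih =>
      intro hx hy
      obtain ⟨hx2, hxh⟩ := pv_strict_cons hx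
      obtain ⟨hy2, hyh⟩ := pv_strict_cons hy
      simp only [List.map_cons]
      rw [pvMKeys, if_pos hab, List.foldl_cons]
      have h1 : pvALook ((a, l) :: xs) a = some l := by simp [pvALook]
      have h2 : pvALook ((b, m, nm) :: ys) a = none := by
        apply pvALook_eq_none
        intro hmem
        rcases List.mem_cons.1 (by simpa only [List.map_cons] using hmem) with h' | h'
        · omega
        · have := hyh a h'; omega
      rw [h1, h2]
      have hstep : pvStep a (some l) none (p, acc) = (false, acc ++ [pvLineTF a l]) := rfl
      rw [hstep]
      conv_lhs => rw [pvMerge]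
      rw [if_pos hab]
      rw [ih hx2 hy]
      simp only [List.map_cons]
      refine PySem.List.foldl_congr_mem _ _ _ _ ?_
      intro st c hc
      rcases (pv_mem_mkeys _ _ c).1 hc with h' | h'
      · have := hxh c h'
        rw [pvALook_cons_ne a l xs c (by omega)]
      · have hbc : b ≤ c := by
          rcases List.mem_cons.1 h' with h'' | h''
          · omega
          · exact le_of_lt (hyh c h'')
        rw [pvALook_cons_ne a l xs c (by omega)]
  | case5 a l xs b m nm ys p acc hab hba ih =>
      intro hx hy
      obtain ⟨hx2, hxh⟩ := pv_strict_cons hx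
      obtain ⟨hy2, hyh⟩ := pv_strict_cons hy
      simp only [List.map_cons]
      rw [pvMKeys, if_neg hab, if_pos hba, List.foldl_cons]
      have h1 : pvALook ((a, l) :: xs) b = none := by
        apply pvALook_eq_none
        intro hmem
        rcases List.mem_cons.1 (by simpa only [List.map_cons] using hmem) with h' | h'
        · omega
        · have := hxh b h'; omega
      have h2 : pvALook ((b, m, nm) :: ys) b = some (m, nm) := by simp [pvALook]
      rw [h1, h2]
      have hstep : pvStep b none (some (m, nm)) (p, acc) = (false, acc ++ [pvLineTR b m nm]) := rfl
      rw [hstep]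
      conv_lhs => rw [pvMerge]
      rw [if_neg hab, if_pos hba]
      rw [ih hx hy2]
      simp only [List.map_cons]
      refine PySem.List.foldl_congr_mem _ _ _ _ ?_
      intro st c hc
      rcases (pv_mem_mkeys _ _ c).1 hc with h' | h'
      · have hac : a ≤ c := by
          rcases List.mem_cons.1 h' with h'' | h''
          · omega
          · exact le_of_lt (hxh c h'')
        rw [pvALook_cons_ne b (m, nm) ys c (by omega)]
      · have := hyh c h'
        rw [pvALook_cons_ne b (m, nm) ys c (by omega)]
  | case6 a l xs b m nm ys p acc hab hba ih =>
      intro hx hy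
      have heq : a = b := le_antisymm (not_lt.1 hba) (not_lt.1 hab)
      subst heq
      obtain ⟨hx2, hxh⟩ := pv_strict_cons hx
      obtain ⟨hy2, hyh⟩ := pv_strict_cons hy
      simp only [List.map_cons]
      rw [pvMKeys, if_neg hab, if_neg hba, List.foldl_cons]
      have h1 : pvALook ((a, l) :: xs) a = some l := by simp [pvALook]
      have h2 : pvALook ((a, m, nm) :: ys) a = some (m, nm) := by simp [pvALook]
      rw [h1, h2]
      have hstep : pvStep a (some l) (some (m, nm)) (p, acc)
          = ((if l ≠ m then false else p), acc ++ [pvLineBoth a l m nm]) := rfl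
      rw [hstep]
      conv_lhs => rw [pvMerge]
      rw [if_neg hab, if_neg hba]
      simp only [dite_eq_ite] at ih ⊢
      rw [ih hx2 hy2]
      refine PySem.List.foldl_congr_mem _ _ _ _ ?_
      intro st c hc
      rcases (pv_mem_mkeys _ _ c).1 hc with h' | h'
      · have := hxh c h'
        rw [pvALook_cons_ne a l xs c (by omega), pvALook_cons_ne a (m, nm) ys c (by omega)]
      · have := hyh c h'
        rw [pvALook_cons_ne a l xs c (by omega), pvALook_cons_ne a (m, nm) ys c (by omega)]

-- strict key order of the sorted item list of a nodup-key dict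
theorem pv_sorted_items_strict {ν : Type} (d : PySem.Dict Int ν) (hnd : d.keys.Nodup) :
    ((PySem.List.sorted d.items (fun kv => kv.1)).map Prod.fst).Pairwise (· < ·) := by
  have hperm : (PySem.List.sorted d.items (fun kv => kv.1)).Perm d.items :=
    PySem.List.sorted_perm _ _ _
  have hnd' : ((PySem.List.sorted d.items (fun kv => kv.1)).map Prod.fst).Nodup := by
    refine ((hperm.map Prod.fst).nodup_iff).2 ?_
    simpa only [PySem.Dict.keys] using hnd
  have hle : ((PySem.List.sorted d.items (fun kv => kv.1)).map Prod.fst).Pairwise (· ≤ ·) := by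
    rw [List.pairwise_map]
    exact PySem.List.sorted_pairwise _ _
  have hne : ((PySem.List.sorted d.items (fun kv => kv.1)).map Prod.fst).Pairwise (· ≠ ·) := hnd'
  exact (hle.and hne).imp (fun h => lt_of_le_of_ne h.1 h.2)

-- dict lookup = assoc-list lookup in the sorted items
theorem pv_get?_eq_alook {ν : Type} (d : PySem.Dict Int ν) (hnd : d.keys.Nodup) (a : Int) :
    pvALook (PySem.List.sorted d.items (fun kv => kv.1)) a = d.get? a := by
  have hperm : (PySem.List.sorted d.items (fun kv => kv.1)).Perm d.items :=
    PySem.List.sorted_perm _ _ _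
  cases h : d.get? a with
  | none =>
      apply pvALook_eq_none
      intro hmem
      rcases List.mem_map.1 hmem with ⟨⟨k, v⟩, hkv, hk⟩
      have hk' : k = a := hk
      subst hk'
      refine (PySem.Dict.get?_eq_none_iff_not_mem_keys d k).1 h ?_
      have hit : (k, v) ∈ d.items := hperm.mem_iff.1 hkv
      show k ∈ d.items.map Prod.fst
      exact List.mem_map.2 ⟨(k, v), hit, rfl⟩
  | some v =>
      have hmem : (a, v) ∈ d.items := ((PySem.Dict.get?_eq_some_iff_mem_items d a v hnd).1 h)
      apply pvALook_eq_some
      · have hnd' : (d.items.map Prod.fst).Nodup := by simpa only [PySem.Dict.keys] using hnd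
        exact ((hperm.map Prod.fst).nodup_iff).2 hnd'
      · exact hperm.mem_iff.2 hmem

theorem pv_ports_eq (tf_cmds : List (Int × Int)) (tr_cmds : List (Int × Int × String)) :
    compare_function_py tf_cmds tr_cmds = compare_function_py_alt tf_cmds tr_cmds := by
  simp only [compare_function_py, compare_function_py_alt]
  set d1 : PySem.Dict Int Int := tf_cmds.foldl (fun d p => d.insert (p.1 - 1) p.2) PySem.Dict.empty with hd1
  set d2 : PySem.Dict Int (Int × String) := tr_cmds.foldl (fun d p => d.insert p.1 p.2) PySem.Dict.empty with hd2
  have hnd1 : d1.keys.Nodup := by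
    rw [hd1]
    exact PySem.Dict.nodup_keys_foldl_insert_key tf_cmds (fun p => p.1 - 1) (fun _ p => p.2)
      PySem.Dict.empty PySem.Dict.nodup_keys_empty
  have hnd2 : d2.keys.Nodup := by
    rw [hd2]
    exact PySem.Dict.nodup_keys_foldl_insert_key tr_cmds (fun p => p.1) (fun _ p => p.2)
      PySem.Dict.empty PySem.Dict.nodup_keys_empty
  set xs := PySem.List.sorted d1.items (fun kv => kv.1) with hxs
  set ys := PySem.List.sorted d2.items (fun kv => kv.1) with hys
  have hxlt := pv_sorted_items_strict d1 hnd1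
  have hylt := pv_sorted_items_strict d2 hnd2
  -- the sorted union of the key sets is exactly the merged key sequence
  have hkeys : PySem.List.sorted (PySem.Set.union (PySem.Set.ofList d1.keys) (PySem.Set.ofList d2.keys)) (fun x => x)
      = pvMKeys (xs.map Prod.fst) (ys.map Prod.fst) := by
    apply PySem.List.sorted_eq_of_perm_of_pairwise_lt
    · refine (List.perm_ext_iff_of_nodup ?_ ?_).2 ?_
      · exact (pv_pairwise_mkeys _ _ hxlt hylt).imp (fun h => ne_of_lt h)
      · exact PySem.Set.nodup_union _ _ (PySem.Set.nodup_ofList _)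
      · intro c
        rw [pv_mem_mkeys, PySem.Set.mem_union, PySem.Set.mem_ofList, PySem.Set.mem_ofList]
        have e1 : c ∈ xs.map Prod.fst ↔ c ∈ d1.keys := by
          rw [((PySem.List.sorted_perm d1.items (fun kv => kv.1) false).map Prod.fst).mem_iff]
          simp [PySem.Dict.keys]
        have e2 : c ∈ ys.map Prod.fst ↔ c ∈ d2.keys := by
          rw [((PySem.List.sorted_perm d2.items (fun kv => kv.1) false).map Prod.fst).mem_iff]
          simp [PySem.Dict.keys]
        rw [e1, e2]
    · exact pv_pairwise_mkeys _ _ hxlt hylt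
  rw [hkeys]
  rw [pv_merge_eq_foldl xs ys true [] hxlt hylt]
  apply PySem.List.foldl_congr_mem
  intro st c _
  rw [pv_get?_eq_alook d1 hnd1 c, pv_get?_eq_alook d2 hnd2 c]

-- ===== VERDICT (by name: the statement is the Claim_ definition above) =====
theorem compare_function_py_spec : Claim_equal_compare_function_py := by
  intro tf_cmds tr_cmds _
  unfold Spec_compare_function_py
  exact pv_ports_eq tf_cmds tr_cmds
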